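-- pv_equiv track=rewrite | github.com/Liam-Brew/CS-385 | Programming Assignments/Homework/algorithm analysis/question6.py | functionA
-- ===== SOURCE A (Python) =====
-- def functionA(n):
--     # 4n^3
--     counter = 0
--     for i in range(0, 4):
--         for j in range(0, n):
--             for k in range(0, n):
--                 for l in range(0, n):
--                     counter += 1
--                     l += 1
--                 k += 1
--             j += 1
--         i += 1
--     return counter
-- ===== SOURCE B (Python) =====
-- def functionA(n):
--     # closed form: the loop body runs 4*n^3 times (0 when n <= 0)
--     return 4 * n * n * n if n > 0 else 0
-- ===== Notes on version B (the rewrite author's own statement) =====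
-- stated objective: faster
-- what changed: Replaced the quadruple nested counting loop with the closed form 4*n^3 (0 for non-positive n).
import Mathlib
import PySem

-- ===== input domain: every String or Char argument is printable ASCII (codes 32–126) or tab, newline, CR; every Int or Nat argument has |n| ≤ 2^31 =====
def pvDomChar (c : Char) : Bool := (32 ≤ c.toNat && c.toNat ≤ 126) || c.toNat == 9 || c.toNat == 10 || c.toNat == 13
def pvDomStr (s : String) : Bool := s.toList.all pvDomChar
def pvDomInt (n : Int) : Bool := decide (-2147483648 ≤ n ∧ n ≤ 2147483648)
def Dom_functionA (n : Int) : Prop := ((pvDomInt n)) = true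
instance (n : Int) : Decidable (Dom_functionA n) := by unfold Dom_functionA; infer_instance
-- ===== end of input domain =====

-- B replaces A's quadruple nested counting loop with the closed form 4*n^3 (0 for n ≤ 0): asymptotically faster.

-- ===== PORT A =====
-- counter += 1 in the innermost of four nested range loops (the i/j/k/l += 1 self-increments
-- inside the Python loops have no effect on range iteration and carry no state to the result)
def functionA (n : Int) : Int :=
  (PySem.List.pyRange 0 4 1).foldl (fun counter _ =>
    (PySem.List.pyRange 0 n 1).foldl (fun counter _ =>
      (PySem.List.pyRange 0 n 1).foldl (fun counter _ =>
        (PySem.List.pyRange 0 n 1).foldl (fun counter _ => counter + 1) counter)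
        counter) counter) 0

-- ===== PORT B =====
def functionA_alt (n : Int) : Int := if n > 0 then 4 * n * n * n else 0

-- ===== PRECONDITION & SPEC =====
def Spec_functionA (n : Int) (out : Int) : Prop := out = functionA_alt n
instance (n : Int) (out : Int) : Decidable (Spec_functionA n out) := by unfold Spec_functionA; infer_instance

-- ===== CLAIM (what is proved, stated in full; the proofs are below) =====
def Claim_equal_functionA : Prop := ∀ (n : Int), Dom_functionA n → Spec_functionA n (functionA n)

-- ===== LEMMAS AND PROOFS =====

-- folding '+ k' over a list adds k per element
theorem foldl_add_const (l : List Int) (k : Int) (c : Int) :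
    l.foldl (fun acc _ => acc + k) c = c + l.length * k := by
  induction l generalizing c with
  | nil => simp
  | cons x xs ih => simp [List.foldl, ih]; ring

theorem functionA_closed (n : Int) :
    functionA n = 4 * ((n.toNat : Int)) ^ 3 := by
  unfold functionA
  have hc : ∀ (c : Int),
      (PySem.List.pyRange 0 n 1).foldl (fun counter _ => counter + 1) c
        = c + n.toNat := by
    intro c
    rw [foldl_add_const]
    simp [PySem.List.length_pyRange_one]
  have hc2 : ∀ (c : Int),
      (PySem.List.pyRange 0 n 1).foldl (fun counter _ =>
        (PySem.List.pyRange 0 n 1).foldl (fun counter _ => counter + 1) counter) c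
        = c + n.toNat * n.toNat := by
    intro c
    have : ((PySem.List.pyRange 0 n 1).foldl (fun counter _ =>
        (PySem.List.pyRange 0 n 1).foldl (fun counter _ => counter + 1) counter) c)
        = (PySem.List.pyRange 0 n 1).foldl (fun counter _ => counter + (n.toNat : Int)) c := by
      apply PySem.List.foldl_congr_mem
      intro a x _; rw [hc a]
    rw [this, foldl_add_const]
    simp [PySem.List.length_pyRange_one]
  have hc3 : ∀ (c : Int),
      (PySem.List.pyRange 0 n 1).foldl (fun counter _ =>
        (PySem.List.pyRange 0 n 1).foldl (fun counter _ =>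
          (PySem.List.pyRange 0 n 1).foldl (fun counter _ => counter + 1) counter) counter) c
        = c + n.toNat * n.toNat * n.toNat := by
    intro c
    have : ((PySem.List.pyRange 0 n 1).foldl (fun counter _ =>
        (PySem.List.pyRange 0 n 1).foldl (fun counter _ =>
          (PySem.List.pyRange 0 n 1).foldl (fun counter _ => counter + 1) counter) counter) c)
        = (PySem.List.pyRange 0 n 1).foldl (fun counter _ => counter + ((n.toNat : Int) * n.toNat)) c := by
      apply PySem.List.foldl_congr_mem
      intro a x _; rw [hc2 a]
    rw [this, foldl_add_const]
    simp [PySem.List.length_pyRange_one]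
    ring
  have h4 : ((PySem.List.pyRange 0 4 1).foldl (fun counter _ =>
      (PySem.List.pyRange 0 n 1).foldl (fun counter _ =>
        (PySem.List.pyRange 0 n 1).foldl (fun counter _ =>
          (PySem.List.pyRange 0 n 1).foldl (fun counter _ => counter + 1) counter) counter) counter) (0 : Int))
      = (PySem.List.pyRange 0 4 1).foldl (fun counter _ => counter + ((n.toNat : Int) * n.toNat * n.toNat)) 0 := by
    apply PySem.List.foldl_congr_mem
    intro a x _; rw [hc3 a]
  rw [h4, foldl_add_const]
  have : (PySem.List.pyRange 0 4 1).length = 4 := by decide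
  rw [this]
  push_cast; ring

-- ===== VERDICT (by name: the statement is the Claim_ definition above) =====
theorem functionA_spec : Claim_equal_functionA := by
  intro n _
  unfold Spec_functionA functionA_alt
  rw [functionA_closed]
  by_cases h : n > 0
  · rw [if_pos h, Int.toNat_of_nonneg h.le]; ring
  · rw [if_neg h, Int.toNat_of_nonpos (le_of_not_gt h)]; simp
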